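-- pv_equiv track=rewrite | github.com/kidkezz/Python-practice | week6/Day 4.py | gamingArrayv1
-- ===== SOURCE A (Python) =====
-- def gamingArrayv1(arr):
--     def max_cuter(arr,j):
--         #found the index
--         ini = {val: ind for ind, val in enumerate(arr)}
--         if j in ini:
--             i = ini[j]
--         return arr[:i]
--
--     bob = 1
--     while len(arr) !=0:
--         j = max(arr)
--         if j == arr[-1]:
--             arr = arr[:-1]
--         else:
--             #iterate the fuction
--             arr = max_cuter(arr,j)
--         bob = 0 if bob ==1 else 1
--     res = 'BOB' if bob ==0 else'ANDY'
--     return res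
-- ===== SOURCE B (Python) =====
-- def gamingArrayv1(arr):
--     cnt = 0
--     best = None
--     for x in arr:
--         if best is None or x >= best:
--             best = x
--             cnt += 1
--     return 'BOB' if cnt % 2 == 1 else 'ANDY'
-- ===== Notes on version B (the rewrite author's own statement) =====
-- stated objective: faster
-- what changed: Replaced the repeated max()+dict-rebuild+truncate loop by a single left-to-right pass counting non-strict running maxima and taking the parity of that count.
import Mathlib
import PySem

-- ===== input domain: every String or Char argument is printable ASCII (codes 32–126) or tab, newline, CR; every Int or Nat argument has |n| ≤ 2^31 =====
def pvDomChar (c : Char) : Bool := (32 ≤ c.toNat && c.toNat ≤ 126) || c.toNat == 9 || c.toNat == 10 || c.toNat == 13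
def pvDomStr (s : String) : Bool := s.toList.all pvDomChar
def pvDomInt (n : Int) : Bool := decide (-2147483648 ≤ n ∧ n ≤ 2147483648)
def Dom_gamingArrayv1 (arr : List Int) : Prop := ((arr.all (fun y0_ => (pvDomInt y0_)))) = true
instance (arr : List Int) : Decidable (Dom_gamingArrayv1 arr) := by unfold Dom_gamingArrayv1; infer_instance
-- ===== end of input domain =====

-- B replaces A's quadratic max()+dict+truncate loop by one pass counting non-strict
-- running maxima and taking the parity (objective: faster, asymptotically).

-- ===== PORT A =====

-- last index of j in l (what A's dict comprehension {val: ind} yields via overwrite);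
-- used only to prove termination of the loop and in the proofs below
def pvLastIdx (j : Int) : List Int → Option Nat
  | [] => none
  | x :: xs =>
    match pvLastIdx j xs with
    | some k => some (k + 1)
    | none => if x = j then some 0 else none

theorem pvLastIdx_lt (j : Int) (l : List Int) (k : Nat) (h : pvLastIdx j l = some k) :
    k < l.length := by
  induction l generalizing k with
  | nil => simp [pvLastIdx] at h
  | cons x xs ih =>
    rw [pvLastIdx] at h
    cases hx : pvLastIdx j xs with
    | some k' =>
      rw [hx] at h
      simp at h
      have := ih k' hx
      simp; omega
    | none =>
      rw [hx] at h
      by_cases hxe : x = j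
      · simp [hxe] at h; simp; omega
      · simp [hxe] at h

-- the dict {val: ind for ind, val in enumerate(l, s)} looks up to the LAST index
theorem pvDictFold (j : Int) (l : List Int) : ∀ (s : Int) (d : PySem.Dict Int Int),
    ((PySem.List.enumerate l s).foldl (fun d p => d.insert p.2 p.1) d).get? j =
      match pvLastIdx j l with
      | some k => some (s + k)
      | none => d.get? j := by
  induction l with
  | nil => intro s d; simp [PySem.List.enumerate_nil, pvLastIdx]
  | cons x xs ih =>
    intro s d
    rw [PySem.List.enumerate_cons, List.foldl_cons, ih]
    cases hx : pvLastIdx j xs with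
    | some k =>
      simp only [pvLastIdx, hx]
      push_cast; ring_nf
    | none =>
      simp only [pvLastIdx, hx]
      rw [PySem.Dict.get?_insert]
      by_cases hxe : x = j
      · subst hxe; simp
      · rw [if_neg (fun h => hxe h.symm), if_neg hxe]

-- ini = {val: ind for ind, val in enumerate(arr)} (the dict is inlined into its lookup)
def pvMaxCuter (arr : List Int) (j : Int) : List Int :=
  match ((PySem.List.enumerate arr 0).foldl (fun d p => d.insert p.2 p.1)
      (PySem.Dict.empty : PySem.Dict Int Int)).get? j with
  | some i => PySem.List.slice arr none (some i)    -- arr[:i]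
  | none => []   -- unreachable: A always calls with j = max(arr) ∈ arr (else NameError)

theorem pvMaxCuter_length_lt (arr : List Int) (j : Int) (h : arr ≠ []) :
    (pvMaxCuter arr j).length < arr.length := by
  unfold pvMaxCuter
  rw [pvDictFold]
  cases hk : pvLastIdx j arr with
  | some k =>
    have hklt := pvLastIdx_lt j arr k hk
    have h0 : ((0 : Int) + (k : Int)) = ((k : Int)) := by ring
    simp only [h0, PySem.List.slice_to_natCast]
    simp [List.length_take]
    omega
  | none =>
    simp only [PySem.Dict.get?_empty]
    have : 0 < arr.length := List.length_pos_of_ne_nil h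
    simpa using this

def pvLoopA (arr : List Int) (bob : Int) : String :=
  if _h : arr = [] then
    if bob = 0 then "BOB" else "ANDY"      -- res = 'BOB' if bob == 0 else 'ANDY'
  else
    match PySem.List.max? arr (fun x => x) with   -- j = max(arr)
    | none => "ANDY"   -- unreachable: arr ≠ []
    | some j =>
      if PySem.List.pyGet? arr (-1) = some j then        -- j == arr[-1]
        pvLoopA (PySem.List.slice arr none (some (-1))) (if bob = 1 then 0 else 1)
      else
        pvLoopA (pvMaxCuter arr j) (if bob = 1 then 0 else 1)
termination_by arr.length
decreasing_by
  · rw [PySem.List.slice_to_neg_one]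
    have : arr ≠ [] := _h
    have := List.length_pos_of_ne_nil this
    simp [List.length_dropLast]; omega
  · exact pvMaxCuter_length_lt arr j _h

def gamingArrayv1 (arr : List Int) : String := pvLoopA arr 1

-- ===== PORT B =====
def gamingArrayv1_alt (arr : List Int) : String :=
  let st := arr.foldl
    (fun (s : Option Int × Int) x =>
      match s.1 with
      | none => (some x, s.2 + 1)
      | some b => if b ≤ x then (some x, s.2 + 1) else s)
    ((none : Option Int), (0 : Int))
  if st.2 % 2 = 1 then "BOB" else "ANDY"

-- ===== PRECONDITION & SPEC =====
def Spec_gamingArrayv1 (arr : List Int) (out : String) : Prop := out = gamingArrayv1_alt arr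
instance (arr : List Int) (out : String) : Decidable (Spec_gamingArrayv1 arr out) := by unfold Spec_gamingArrayv1; infer_instance

-- ===== CLAIM (what is proved, stated in full; the proofs are below) =====
def Claim_equal_gamingArrayv1 : Prop := ∀ (arr : List Int), Dom_gamingArrayv1 arr → Spec_gamingArrayv1 arr (gamingArrayv1 arr)

-- ===== LEMMAS AND PROOFS =====

def pvIsRec (m : Option Int) (x : Int) : Bool :=
  match m with
  | none => true
  | some b => decide (b ≤ x)

-- number of non-strict running maxima of l, starting from best-so-far m
def pvCnt (m : Option Int) : List Int → Int
  | [] => 0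
  | x :: xs => if pvIsRec m x then 1 + pvCnt (some x) xs else pvCnt m xs

theorem pvCnt_nonneg (l : List Int) : ∀ m, 0 ≤ pvCnt m l := by
  induction l with
  | nil => intro m; simp [pvCnt]
  | cons x xs ih =>
    intro m
    simp only [pvCnt]
    split_ifs
    · have := ih (some x); omega
    · exact ih m

theorem pvFoldl_snd (l : List Int) : ∀ (m : Option Int) (c : Int),
    (l.foldl
      (fun (s : Option Int × Int) x =>
        match s.1 with
        | none => (some x, s.2 + 1)
        | some b => if b ≤ x then (some x, s.2 + 1) else s)
      (m, c)).2 = c + pvCnt m l := by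
  induction l with
  | nil => intro m c; simp [pvCnt]
  | cons x xs ih =>
    intro m c
    cases m with
    | none => rw [List.foldl_cons]; simp only []; rw [ih]; simp [pvCnt, pvIsRec]; ring
    | some b =>
      rw [List.foldl_cons]
      by_cases hb : b ≤ x
      · simp only [hb, if_pos]; rw [ih]; simp [pvCnt, pvIsRec, hb]; ring
      · simp only [hb, if_neg, not_false_iff]; rw [ih]; simp [pvCnt, pvIsRec, hb]

theorem pvCnt_zero (b : Int) (l : List Int) (h : ∀ x ∈ l, x < b) : pvCnt (some b) l = 0 := by
  induction l with
  | nil => simp [pvCnt]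
  | cons x xs ih =>
    have hx : x < b := h x (List.mem_cons_self ..)
    simp only [pvCnt, pvIsRec]
    rw [if_neg (by simp; omega)]
    exact ih (fun y hy => h y (List.mem_cons_of_mem _ hy))

-- removing the suffix from the LAST occurrence of the maximum loses exactly one record
theorem pvCnt_step (l : List Int) : ∀ (m : Option Int) (k : Nat) (j : Int),
    (∀ x ∈ l, x ≤ j) → (∀ b, m = some b → b ≤ j) →
    l[k]? = some j → (∀ i, k < i → l[i]? ≠ some j) →
    pvCnt m l = pvCnt m (l.take k) + 1 := by
  induction l with
  | nil => intro m k j _ _ hget _; simp at hget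
  | cons x xs ih =>
    intro m k j hle hm hget hlast
    cases k with
    | zero =>
      simp at hget
      subst hget
      have hrec : pvIsRec m x = true := by
        cases m with
        | none => rfl
        | some b => simp [pvIsRec]; exact hm b rfl
      simp only [List.take_zero, pvCnt, hrec, if_pos]
      have hz : pvCnt (some x) xs = 0 := by
        apply pvCnt_zero
        intro y hy
        have hyle : y ≤ x := hle y (List.mem_cons_of_mem _ hy)
        by_contra hcon
        have hyx : y = x := le_antisymm hyle (by omega)
        obtain ⟨i, hi, hyi⟩ := List.mem_iff_getElem.mp hy
        have hg : (x :: xs)[i + 1]? = some x := by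
          simp only [List.getElem?_cons_succ]
          rw [List.getElem?_eq_getElem hi, hyi, hyx]
        exact hlast (i + 1) (Nat.succ_pos i) hg
      omega
    | succ k' =>
      have hget' : xs[k']? = some j := by simpa using hget
      have hlast' : ∀ i, k' < i → xs[i]? ≠ some j := by
        intro i hi
        have := hlast (i + 1) (by omega)
        simpa using this
      have hle' : ∀ y ∈ xs, y ≤ j := fun y hy => hle y (List.mem_cons_of_mem _ hy)
      simp only [List.take_succ_cons, pvCnt]
      by_cases hr : pvIsRec m x = true
      · rw [if_pos hr, if_pos hr]
        have hxj : x ≤ j := hle x (List.mem_cons_self ..)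
        rw [ih (some x) k' j hle' (by intro b hb; cases hb; exact hxj) hget' hlast']
        ring
      · rw [if_neg hr, if_neg hr]
        exact ih m k' j hle' hm hget' hlast'

theorem pvLastIdx_get (j : Int) (l : List Int) (k : Nat) (h : pvLastIdx j l = some k) :
    l[k]? = some j := by
  induction l generalizing k with
  | nil => simp [pvLastIdx] at h
  | cons x xs ih =>
    rw [pvLastIdx] at h
    cases hx : pvLastIdx j xs with
    | some k' =>
      rw [hx] at h
      simp at h
      subst h
      simpa using ih k' hx
    | none =>
      rw [hx] at h
      by_cases hxe : x = j
      · simp [hxe] at h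
        subst h
        simp [hxe]
      · simp [hxe] at h

theorem pvLastIdx_of_mem (j : Int) (l : List Int) (h : j ∈ l) :
    ∃ k, pvLastIdx j l = some k := by
  induction l with
  | nil => simp at h
  | cons x xs ih =>
    rw [pvLastIdx]
    cases hx : pvLastIdx j xs with
    | some k => exact ⟨k + 1, rfl⟩
    | none =>
      rcases List.mem_cons.mp h with h1 | h2
      · exact ⟨0, by rw [if_pos h1.symm]⟩
      · obtain ⟨k, hk⟩ := ih h2
        rw [hk] at hx; cases hx

theorem pvLastIdx_last (j : Int) (l : List Int) (k : Nat) (h : pvLastIdx j l = some k) :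
    ∀ i, k < i → l[i]? ≠ some j := by
  induction l generalizing k with
  | nil => intro i _; simp
  | cons x xs ih =>
    rw [pvLastIdx] at h
    cases hx : pvLastIdx j xs with
    | some k' =>
      rw [hx] at h
      simp at h
      subst h
      intro i hi
      cases i with
      | zero => omega
      | succ i' =>
        simp only [List.getElem?_cons_succ]
        exact ih k' hx i' (by omega)
    | none =>
      rw [hx] at h
      by_cases hxe : x = j
      case pos =>
        simp [hxe] at h
        subst h
        intro i hi
        cases i with
        | zero => omega
        | succ i' =>
          simp only [List.getElem?_cons_succ]
          intro hcon
          have hjmem : j ∈ xs := by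
            have := List.getElem?_eq_some_iff.mp hcon
            obtain ⟨hlt, hv⟩ := this
            exact hv ▸ List.getElem_mem hlt
          obtain ⟨k'', hk''⟩ := pvLastIdx_of_mem j xs hjmem
          rw [hk''] at hx; cases hx
      case neg => simp [hxe] at h

theorem pvMaxCuter_eq_take (arr : List Int) (j : Int) (k : Nat)
    (hk : pvLastIdx j arr = some k) : pvMaxCuter arr j = arr.take k := by
  unfold pvMaxCuter
  rw [pvDictFold, hk]
  simp only []
  have h0 : ((0 : Int) + (k : Int)) = ((k : Int)) := by ring
  rw [h0, PySem.List.slice_to_natCast]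

theorem pvLoopA_eq (n : Nat) : ∀ (arr : List Int), arr.length ≤ n → ∀ (bob : Int),
    (bob = 0 ∨ bob = 1) →
    pvLoopA arr bob = (if (bob + pvCnt none arr) % 2 = 0 then "BOB" else "ANDY") := by
  induction n with
  | zero =>
    intro arr hlen bob hbob
    have : arr = [] := List.eq_nil_of_length_eq_zero (by omega)
    subst this
    rw [pvLoopA]
    simp only [pvCnt]
    rcases hbob with h | h <;> subst h <;> norm_num
  | succ n ih =>
    intro arr hlen bob hbob
    by_cases harr : arr = []
    · subst harr
      rw [pvLoopA]
      simp only [pvCnt]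
      rcases hbob with h | h <;> subst h <;> norm_num
    · obtain ⟨j, hj⟩ : ∃ j, PySem.List.max? arr (fun x => x) = some j := by
        cases hm : PySem.List.max? arr (fun x => x) with
        | some j => exact ⟨j, rfl⟩
        | none => exact absurd (Iff.mp (PySem.List.max?_eq_none_iff arr (fun x => x)) hm) harr
      have hjmem : j ∈ arr := PySem.List.max?_mem hj
      have hjmax : ∀ x ∈ arr, x ≤ j := by
        intro x hx
        exact PySem.List.max?_isMax hj x hx
      have hbob' : (if bob = 1 then (0:Int) else 1) = 0 ∨ (if bob = 1 then (0:Int) else 1) = 1 := by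
        rcases hbob with h | h <;> subst h <;> simp
      obtain ⟨k, hk⟩ := pvLastIdx_of_mem j arr hjmem
      have hklt := pvLastIdx_lt j arr k hk
      have hkget := pvLastIdx_get j arr k hk
      have hklast := pvLastIdx_last j arr k hk
      have hcnt : pvCnt none arr = pvCnt none (arr.take k) + 1 :=
        pvCnt_step arr none k j hjmax (by intro b hb; cases hb) hkget hklast
      rw [pvLoopA, dif_neg harr, hj]
      simp only []
      by_cases hlastj : PySem.List.pyGet? arr (-1) = some j
      · rw [if_pos hlastj]
        -- arr[-1] = j forces k = length - 1, and arr[:-1] = take (length-1)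
        have hgl : arr[arr.length - 1]? = some j := by
          rw [PySem.List.pyGet?_neg_one] at hlastj
          rwa [List.getLast?_eq_getElem?] at hlastj
        have hkval : k = arr.length - 1 := by
          by_contra hne
          have hklt1 : k < arr.length - 1 := by omega
          exact hklast (arr.length - 1) (by omega) hgl
        rw [PySem.List.slice_to_neg_one]
        have hdrop : arr.dropLast = arr.take k := by
          rw [List.dropLast_eq_take, hkval]
        rw [hdrop]
        rw [ih (arr.take k) (by simp [List.length_take]; omega) _ hbob']
        have hc := pvCnt_nonneg (arr.take k) none
        rcases hbob with h | h <;> subst h <;>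
          · split_ifs with h1 h2 h2 <;> first | rfl | omega
      · rw [if_neg hlastj]
        rw [pvMaxCuter_eq_take arr j k hk]
        rw [ih (arr.take k) (by simp [List.length_take]; omega) _ hbob']
        rcases hbob with h | h <;> subst h <;>
          · split_ifs with h1 h2 h2 <;> first | rfl | omega

-- ===== VERDICT (by name: the statement is the Claim_ definition above) =====
theorem gamingArrayv1_spec : Claim_equal_gamingArrayv1 := by
  intro arr _
  unfold Spec_gamingArrayv1 gamingArrayv1 gamingArrayv1_alt
  rw [pvLoopA_eq arr.length arr le_rfl 1 (Or.inr rfl)]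
  simp only [pvFoldl_snd]
  have := pvCnt_nonneg arr none
  split_ifs with h1 h2 h2 <;> first | rfl | omega
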